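-- pv_equiv track=rewrite | github.com/os-fpga/IP_Catalog | rapidsilicon/ip/fifo_generator/v1_0/fifo_generator_gen.py | factors_multiples
-- ===== SOURCE A (Python) =====
-- def factors_multiples(number):
--     factors = []
--     for i in range(2, number + 1):
--         if number % i == 0:
--             factors.append(i)
--     sequence = []
--     while (number not in sequence):
--         sequence = [min(factors)]
--         while sequence[-1] * 2 <= 1024:
--             next_number = sequence[-1] * 2
--             sequence.append(next_number)
--         if number in sequence:
--             break
--         else:
--             factors.pop(0)
--     return sequence
-- ===== SOURCE B (Python) =====
-- def factors_multiples(number):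
--     # O(log n): halve number down to the smallest divisor >= 2 whose cofactor
--     # is a power of two (odd part, or 2 for powers of two; number itself when
--     # number > 1024), then emit its doubling chain up to 1024.
--     start = number
--     if number <= 1024:
--         while start % 2 == 0 and start > 2:
--             start //= 2
--     seq = [start]
--     x = start * 2
--     while x <= 1024:
--         seq.append(x)
--         x *= 2
--     return seq
-- ===== Notes on version B (the rewrite author's own statement) =====
-- stated objective: faster
-- what changed: A enumerates all divisors 2..n and repeatedly rebuilds doubling chains, popping divisors until the chain hits n; B computes the starting point directly by halving n down to its odd part (or to 2 when n is a power of two, or n itself when n > 1024) and emits the single doubling chain.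
import Mathlib
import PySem

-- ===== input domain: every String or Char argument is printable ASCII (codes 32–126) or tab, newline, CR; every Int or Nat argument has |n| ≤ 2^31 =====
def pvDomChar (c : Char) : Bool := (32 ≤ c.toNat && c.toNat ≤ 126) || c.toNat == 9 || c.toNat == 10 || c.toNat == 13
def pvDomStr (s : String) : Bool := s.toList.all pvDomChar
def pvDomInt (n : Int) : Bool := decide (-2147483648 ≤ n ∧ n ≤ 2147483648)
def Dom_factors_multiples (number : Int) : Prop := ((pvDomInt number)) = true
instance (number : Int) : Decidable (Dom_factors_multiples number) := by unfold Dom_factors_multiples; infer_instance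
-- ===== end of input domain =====

-- B replaces A's divisor enumeration + chain-rebuilding loop by directly halving the
-- input to the chain's start (objective: faster).


-- ===== PORT A =====
-- inner while loop: keep appending sequence[-1] * 2 while it is ≤ 1024.
-- The Nat argument is FUEL, a totality device only: Python's loop terminates exactly
-- when the start value is positive (at most 10 doublings stay ≤ 1024, so the fuel 11
-- below is never exhausted there), and under Pre_ every start value is a divisor ≥ 2.
def pvDoublesAGo : Int → Nat → List Int
  | x, 0 => [x]
  | x, n + 1 => if x * 2 ≤ 1024 then x :: pvDoublesAGo (x * 2) n else [x]

def pvDoublesA (x : Int) : List Int := pvDoublesAGo x 11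

-- outer while loop; recursion on the factors list (factors.pop(0) = tail)
def pvLoopA (number : Int) : List Int → List Int → List Int
  | factors, sequence =>
    if number ∈ sequence then sequence
    else
      match factors with
      | [] => []   -- Python: min([]) raises ValueError here; excluded by Pre_
      | f :: rest =>
        match PySem.List.min? (f :: rest) (fun x => x) with
        | none => []   -- unreachable: the list is nonempty
        | some m =>
          let seq := pvDoublesA m
          if number ∈ seq then seq else pvLoopA number rest seq

def pvFactorsA (number : Int) : List Int :=
  (PySem.List.pyRange 2 (number + 1) 1).foldl
    (fun acc i => if PySem.Int.mod number i = 0 then acc ++ [i] else acc) []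

def factors_multiples (number : Int) : List Int :=
  pvLoopA number (pvFactorsA number) []

-- ===== PORT B =====
-- while start % 2 == 0 and start > 2: start //= 2.  The Nat argument is FUEL, a
-- totality device only: |number| ≤ 2^31 and the value halves each step, so 32 is
-- never exhausted on the stated domain.
def pvOddToGo : Int → Nat → Int
  | x, 0 => x
  | x, n + 1 =>
    if PySem.Int.mod x 2 = 0 ∧ 2 < x then pvOddToGo (PySem.Int.floordiv x 2) n else x

def pvOddTo (x : Int) : Int := pvOddToGo x 32

-- x = start * 2; while x <= 1024: seq.append(x); x *= 2.  Fuel as above.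
def pvDoublesBGo : Int → Nat → List Int
  | _, 0 => []
  | x, n + 1 => if x ≤ 1024 then x :: pvDoublesBGo (x * 2) n else []

def factors_multiples_alt (number : Int) : List Int :=
  let start := if number ≤ 1024 then pvOddTo number else number
  start :: pvDoublesBGo (start * 2) 11

-- ===== PRECONDITION & SPEC =====
-- Pre_: Python A raises ValueError (min() of an empty list) exactly when number ≤ 1.
def Pre_factors_multiples (number : Int) : Prop := 2 ≤ number
instance (number : Int) : Decidable (Pre_factors_multiples number) := by unfold Pre_factors_multiples; infer_instance
def pvWitness_factors_multiples : Int := 6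

def Spec_factors_multiples (number : Int) (out : List Int) : Prop := out = factors_multiples_alt number
instance (number : Int) (out : List Int) : Decidable (Spec_factors_multiples number out) := by unfold Spec_factors_multiples; infer_instance

-- ===== CLAIM (what is proved, stated in full; the proofs are below) =====
def Claim_equal_factors_multiples : Prop := ∀ (number : Int), Dom_factors_multiples number → Pre_factors_multiples number → Spec_factors_multiples number (factors_multiples number)

-- ===== LEMMAS AND PROOFS =====

theorem doublesA_eq_B : ∀ (n : Nat) (x : Int), pvDoublesAGo x n = x :: pvDoublesBGo (x * 2) n := by
  intro n
  induction n with
  | zero => intro x; rfl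
  | succ m ih =>
    intro x
    by_cases h : x * 2 ≤ 1024
    · simp only [pvDoublesAGo, pvDoublesBGo, if_pos h, ih (x * 2)]
    · simp only [pvDoublesAGo, pvDoublesBGo, if_neg h]

theorem self_mem_doubles (x : Int) : x ∈ pvDoublesA x := by
  unfold pvDoublesA pvDoublesAGo
  split <;> simp

theorem mem_doublesGo_le : ∀ (n : Nat) (x y : Int), y ∈ pvDoublesAGo x n → y = x ∨ y ≤ 1024 := by
  intro n
  induction n with
  | zero => intro x y hy; simp [pvDoublesAGo] at hy; exact Or.inl hy
  | succ m ih =>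
    intro x y hy
    rw [pvDoublesAGo] at hy
    split at hy
    · rcases (by simpa using hy) with h1 | h2
      · exact Or.inl h1
      · rcases ih (x * 2) y h2 with h3 | h3
        · omega
        · exact Or.inr h3
    · simp at hy; exact Or.inl hy

theorem mem_doublesGo_pow : ∀ (n : Nat) (x y : Int), y ∈ pvDoublesAGo x n → ∃ k : ℕ, y = x * 2 ^ k := by
  intro n
  induction n with
  | zero => intro x y hy; simp [pvDoublesAGo] at hy; exact ⟨0, by simpa using hy⟩
  | succ m ih =>
    intro x y hy
    rw [pvDoublesAGo] at hy
    split at hy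
    · rcases (by simpa using hy) with h1 | h2
      · exact ⟨0, by simpa using h1⟩
      · obtain ⟨k, hk⟩ := ih (x * 2) y h2
        exact ⟨k + 1, by rw [hk]; ring⟩
    · simp at hy; exact ⟨0, by simpa using hy⟩

theorem pow_mem_doublesGo : ∀ (n k : ℕ) (x : Int), 0 < x → k ≤ n → x * 2 ^ k ≤ 1024 →
    x * 2 ^ k ∈ pvDoublesAGo x n := by
  intro n
  induction n with
  | zero =>
    intro k x _ hk _
    interval_cases k
    simp [pvDoublesAGo]
  | succ m ih =>
    intro k x hx hk hle
    match k with
    | 0 =>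
      simp only [pow_zero, mul_one]
      rw [pvDoublesAGo]; split <;> simp
    | j + 1 =>
      have hpow : (1 : Int) ≤ 2 ^ j := one_le_pow₀ (by norm_num)
      have h2 : x * 2 ≤ 1024 := by
        have h3 : x * 2 ≤ x * 2 * 2 ^ j := le_mul_of_one_le_right (by omega) hpow
        have h4 : x * 2 * 2 ^ j = x * 2 ^ (j + 1) := by ring
        linarith
      rw [pvDoublesAGo, if_pos h2]
      have hx2 : x * 2 ^ (j + 1) = (x * 2) * 2 ^ j := by ring
      rw [hx2]
      exact List.mem_cons_of_mem _ (ih j (x * 2) (by omega) (by omega) (by rw [← hx2]; exact hle))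

theorem oddToGo_spec : ∀ (n : ℕ) (x : Int), 2 ≤ x → x ≤ 2 ^ n →
    2 ≤ pvOddToGo x n ∧ (pvOddToGo x n % 2 = 1 ∨ pvOddToGo x n = 2) ∧
      ∃ k : ℕ, x = pvOddToGo x n * 2 ^ k := by
  intro n
  induction n with
  | zero => intro x hx hb; norm_num at hb; omega
  | succ m ih =>
    intro x hx hb
    have hm : PySem.Int.mod x 2 = x % 2 := PySem.Int.mod_eq_emod_of_pos (by norm_num)
    have hd : PySem.Int.floordiv x 2 = x / 2 := PySem.Int.floordiv_eq_ediv_of_pos (by norm_num)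
    rw [pvOddToGo]
    by_cases h : PySem.Int.mod x 2 = 0 ∧ 2 < x
    · rw [if_pos h, hd]
      rw [hm] at h
      have hb2 : x / 2 ≤ 2 ^ m := by
        rw [pow_succ] at hb; omega
      obtain ⟨h1, h2, k, hk⟩ := ih (x / 2) (by omega) hb2
      refine ⟨h1, h2, k + 1, ?_⟩
      have hxe : x = x / 2 * 2 := by omega
      rw [pow_succ, ← mul_assoc, ← hk]; omega
    · rw [if_neg h, hm] at *
      rw [hm] at h
      refine ⟨hx, ?_, 0, by ring⟩
      omega

theorem min_pow_le {s d : Int} {v k : ℕ} (hs2 : 2 ≤ s) (hd : 2 ≤ d)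
    (hodd : s % 2 = 1 ∨ s = 2) (heq : s * 2 ^ v = d * 2 ^ k) : s ≤ d := by
  by_contra hlt
  push_neg at hlt
  by_cases hkv : k ≤ v
  · have : s * 2 ^ (v - k) * 2 ^ k = d * 2 ^ k := by
      rw [mul_assoc, ← pow_add, Nat.sub_add_cancel hkv]; exact heq
    have hcancel : s * 2 ^ (v - k) = d :=
      mul_right_cancel₀ (by positivity) this
    have hpow : (1 : Int) ≤ 2 ^ (v - k) := one_le_pow₀ (by norm_num)
    nlinarith
  · push_neg at hkv
    have : s * 2 ^ v = d * 2 ^ (k - v) * 2 ^ v := by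
      rw [mul_assoc, ← pow_add, Nat.sub_add_cancel (by omega)]; exact heq
    have hcancel : s = d * 2 ^ (k - v) :=
      mul_right_cancel₀ (by positivity) this
    have hkv1 : 1 ≤ k - v := by omega
    have : (2 : Int) ^ 1 ≤ 2 ^ (k - v) := pow_le_pow_right₀ (by norm_num) hkv1
    rcases hodd with ho | ho
    · have : (2 : Int) ∣ s := by
        rw [hcancel]
        exact Dvd.dvd.mul_left ⟨2 ^ (k - v - 1), by rw [← pow_succ']; congr 1; omega⟩ d
      omega
    · nlinarith

theorem mem_factors {number d : Int} :
    d ∈ pvFactorsA number ↔ (2 ≤ d ∧ d < number + 1 ∧ d ∣ number) := by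
  unfold pvFactorsA
  rw [PySem.List.foldl_append_ite_eq_filter]
  simp [List.mem_filter, PySem.List.mem_pyRange_one, PySem.Int.mod_eq_zero_iff_dvd,
    and_assoc]

theorem pairwise_factors (number : Int) : (pvFactorsA number).Pairwise (· < ·) := by
  unfold pvFactorsA
  rw [PySem.List.foldl_append_ite_eq_filter]
  simpa using List.Pairwise.filter _ (PySem.List.pairwise_lt_pyRange_one 2 (number + 1))

theorem loop_eq {number s : Int} : ∀ (L : List Int) (seq : List Int),
    L.Pairwise (· < ·) → number ∉ seq → s ∈ L → number ∈ pvDoublesA s →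
    (∀ d ∈ L, d < s → number ∉ pvDoublesA d) →
    pvLoopA number L seq = pvDoublesA s := by
  intro L
  induction L with
  | nil => intro seq _ _ hs; simp at hs
  | cons f rest ih =>
    intro seq hpw hseq hs hmem hmin
    rw [pvLoopA]
    simp only [hseq, if_false]
    rcases hmn : PySem.List.min? (f :: rest) (fun x => x) with _ | m
    · exact absurd hmn (by simp [PySem.List.min?_eq_none_iff])
    · have hmmem : m ∈ f :: rest := PySem.List.min?_mem hmn
      have hle : m ≤ f := PySem.List.min?_isMin hmn f (by simp)
      have hmf : m = f := by
        rcases List.mem_cons.1 hmmem with heq | hmr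
        · exact heq
        · exact absurd (List.rel_of_pairwise_cons hpw hmr) (by omega)
      subst hmf
      by_cases hin : number ∈ pvDoublesA m
      · have hms : m = s := by
          rcases List.mem_cons.1 hs with heq | hsr
          · exact heq.symm
          · have : m < s := List.rel_of_pairwise_cons hpw hsr
            exact absurd hin (hmin m (by simp) this)
        subst hms
        simp [hin]
      · have hms : s ∈ rest := by
          rcases List.mem_cons.1 hs with heq | hsr
          · exact absurd (heq ▸ hmem) hin
          · exact hsr
        simp only [hin, if_false]
        exact ih (pvDoublesA m) hpw.of_cons hin hms hmem
          (fun d hd hds => hmin d (List.mem_cons_of_mem _ hd) hds)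

-- ===== VERDICT (by name: the statement is the Claim_ definition above) =====
theorem factors_multiples_spec : Claim_equal_factors_multiples := by
  intro number hdom hpre
  unfold Spec_factors_multiples factors_multiples factors_multiples_alt
  have hpre' : (2 : Int) ≤ number := hpre
  have hdom' : number ≤ 2147483648 := by
    simp only [Dom_factors_multiples, pvDomInt, decide_eq_true_eq] at hdom
    omega
  set s : Int := if number ≤ 1024 then pvOddTo number else number with hsdef
  rw [show s :: pvDoublesBGo (s * 2) 11 = pvDoublesA s from (doublesA_eq_B 11 s).symm]
  have hkey : ∃ (v : ℕ), number = s * 2 ^ v ∧ 2 ≤ s ∧ (s % 2 = 1 ∨ s = 2 ∨ 1024 < number) := by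
    by_cases hle : number ≤ 1024
    · have hb : number ≤ 2 ^ 32 := by norm_num; omega
      obtain ⟨h1, h2, k, hk⟩ := oddToGo_spec 32 number hpre' hb
      refine ⟨k, ?_, ?_, ?_⟩ <;> rw [hsdef, if_pos hle] <;> unfold pvOddTo
      · exact hk
      · exact h1
      · tauto
    · refine ⟨0, ?_, ?_, by omega⟩ <;> rw [hsdef, if_neg hle]
      · ring
      · omega
  obtain ⟨v, hv, hs2, hsodd⟩ := hkey
  have hsdvd : s ∣ number := ⟨2 ^ v, hv⟩
  have hsle : s ≤ number := Int.le_of_dvd (by omega) hsdvd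
  have hmem : number ∈ pvDoublesA s := by
    by_cases hle : number ≤ 1024
    · have hvle : v ≤ 11 := by
        by_contra hv11
        have : (2 : Int) ^ 11 ≤ 2 ^ v := pow_le_pow_right₀ (by norm_num) (by omega)
        nlinarith
      rw [hv]
      exact pow_mem_doublesGo 11 v s (by omega) hvle (by omega)
    · have : s = number := by rw [hsdef, if_neg hle]
      rw [this]; exact self_mem_doubles number
  apply loop_eq (pvFactorsA number) [] (pairwise_factors number) (by simp)
    (mem_factors.2 ⟨hs2, by omega, hsdvd⟩) hmem
  intro d hd hds hdin
  obtain ⟨hd2, hdlt, hddvd⟩ := mem_factors.1 hd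
  obtain ⟨k, hk⟩ := mem_doublesGo_pow 11 d number hdin
  by_cases hle : number ≤ 1024
  · have hodd : s % 2 = 1 ∨ s = 2 := by
      rcases hsodd with h | h | h
      · exact Or.inl h
      · exact Or.inr h
      · omega
    have : s ≤ d := min_pow_le hs2 hd2 hodd (by rw [← hv, ← hk])
    omega
  · have hsn : s = number := by rw [hsdef, if_neg hle]
    rcases mem_doublesGo_le 11 d number hdin with h | h
    · omega
    · omega
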